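-- pv_equiv track=rewrite | github.com/Priya22/react-annotator | backend/ann_disagreement.py | check_group_equivalent
-- ===== SOURCE A (Python) =====
-- from collections import defaultdict
--
-- def check_group_equivalent(speakees1, speakees2, name2id, annotator_names):
--
-- 	if len(speakees1) == len(speakees2) == 0:
-- 		return True
--
-- 	id2names = {}
-- 	ids1 = set(speakees1[:])
-- 	ids2 = set(speakees2[:])
--
-- 	for ann in annotator_names:
-- 		id2names[ann] = defaultdict(list)
-- 		for name,id_ in name2id[ann].items():
-- 			id2names[ann][id_].append(name)
--
-- 	if len(ids1) != len(ids2):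
-- 		return False
--
-- 	s2id1 = {}
-- 	s2id2 = {}
-- 	for a_name, slist, s2id in zip(annotator_names, [ids1, ids2], [s2id1, s2id2]):
-- 		for s in slist:
-- 			for n in id2names[a_name][s]:
-- 				s2id[n] = s
--
-- 	common_names = set(s2id1.keys()).intersection(set(s2id2.keys()))
--
-- 	for com in common_names:
-- 		id1 = s2id1[com]
-- 		id2 = s2id2[com]
--
-- 		if id1 in ids1:
-- 			ids1.remove(id1)
-- 		if id2 in ids2:
-- 			ids2.remove(id2)
--
-- 	if len(ids1) == 0 and len(ids2) == 0:
-- 		return True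
--
-- 	return False
-- ===== SOURCE B (Python) =====
-- def check_group_equivalent(speakees1, speakees2, name2id, annotator_names):
--     ids1, ids2 = set(speakees1), set(speakees2)
--     if not ids1 and not ids2:
--         return True
--     if len(annotator_names) < 2:
--         return False
--     m1 = {n: i for n, i in name2id[annotator_names[0]].items() if i in ids1}
--     m2 = {n: i for n, i in name2id[annotator_names[1]].items() if i in ids2}
--     if len(ids1) != len(ids2):
--         return False
--     removed1 = {i for n, i in m1.items() if n in m2}
--     removed2 = {i for n, i in m2.items() if n in m1}
--     return removed1 == ids1 and removed2 == ids2
-- ===== Notes on version B (the rewrite author's own statement) =====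
-- stated objective: simpler
-- what changed: A builds an id-to-names defaultdict for every annotator, two name-to-id dicts via a zip loop over set iteration, intersects their key sets and empties the id sets by a removal loop; B builds only two name-to-id association maps (first two annotators, restricted to each group's ids), takes the ids whose name occurs in the other map, and compares those removed sets to the groups directly.
import Mathlib
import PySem

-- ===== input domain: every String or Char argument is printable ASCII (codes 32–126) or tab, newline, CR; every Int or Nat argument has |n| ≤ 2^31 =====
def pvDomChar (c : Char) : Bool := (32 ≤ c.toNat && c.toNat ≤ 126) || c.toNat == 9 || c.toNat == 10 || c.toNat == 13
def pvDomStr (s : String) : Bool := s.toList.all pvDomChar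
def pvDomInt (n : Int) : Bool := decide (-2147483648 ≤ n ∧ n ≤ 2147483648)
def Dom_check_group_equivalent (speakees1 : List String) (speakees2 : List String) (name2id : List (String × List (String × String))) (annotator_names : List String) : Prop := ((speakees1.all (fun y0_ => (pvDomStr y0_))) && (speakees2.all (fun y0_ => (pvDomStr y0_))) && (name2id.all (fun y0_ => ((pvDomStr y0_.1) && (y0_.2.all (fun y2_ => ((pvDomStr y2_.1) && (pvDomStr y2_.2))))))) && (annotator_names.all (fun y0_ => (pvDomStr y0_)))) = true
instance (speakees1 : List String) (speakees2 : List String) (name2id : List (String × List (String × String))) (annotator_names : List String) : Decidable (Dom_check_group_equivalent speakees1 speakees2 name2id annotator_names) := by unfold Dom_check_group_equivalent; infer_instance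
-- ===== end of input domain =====

-- B replaces A's four dict/set-building loops (the id-to-names grouping over ALL annotators,
-- the zip loop, the common-name removal loop) by two filtered association lists for the first
-- two annotators and a direct set-equality test; objective: simpler.

-- ===== PORT A =====
def check_group_equivalent (speakees1 : List String) (speakees2 : List String) (name2id : List (String × List (String × String))) (annotator_names : List String) : Bool :=
  if speakees1.length == 0 && speakees2.length == 0 then true
  else
    let ids1 : PySem.Set String := PySem.Set.ofList speakees1
    let ids2 : PySem.Set String := PySem.Set.ofList speakees2
    -- for ann in annotator_names: id2names[ann] = defaultdict(list); for name,id_ in name2id[ann].items(): id2names[ann][id_].append(name)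
    let id2names : PySem.Dict String (PySem.Dict String (List String)) :=
      annotator_names.foldl (fun d ann =>
        d.insert ann
          (((PySem.Dict.mk name2id).getD ann []).foldl
            (fun (g : PySem.Dict String (List String)) p => g.modify p.2 [] (· ++ [p.1]))
            PySem.Dict.empty))
        PySem.Dict.empty
    if ids1.length != ids2.length then false
    else
      -- for a_name, slist, s2id in zip(annotator_names, [ids1, ids2], [s2id1, s2id2]): for s in slist: for n in id2names[a_name][s]: s2id[n] = s
      let s2ids : List (PySem.Dict String String) :=
        (annotator_names.zip [ids1, ids2]).map (fun pr =>
          pr.2.foldl (fun (s2id : PySem.Dict String String) s =>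
            ((id2names.getD pr.1 PySem.Dict.empty).getD s []).foldl
              (fun t n => t.insert n s) s2id)
            PySem.Dict.empty)
      let s2id1 := s2ids.getD 0 PySem.Dict.empty
      let s2id2 := s2ids.getD 1 PySem.Dict.empty
      let common_names : PySem.Set String :=
        PySem.Set.inter (PySem.Set.ofList (PySem.Dict.keys s2id1)) (PySem.Set.ofList (PySem.Dict.keys s2id2))
      -- for com in common_names: id1 = s2id1[com]; id2 = s2id2[com]; if id1 in ids1: ids1.remove(id1) …
      -- (com is always a key of both dicts, so s2id1[com] = getD com ""; 'if … in: remove' is Set.discard)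
      let final :=
        common_names.foldl
          (fun (st : PySem.Set String × PySem.Set String) com =>
            (PySem.Set.discard st.1 (s2id1.getD com ""), PySem.Set.discard st.2 (s2id2.getD com "")))
          (ids1, ids2)
      if final.1.length == 0 && final.2.length == 0 then true else false

-- ===== PORT B =====
def check_group_equivalent_alt (speakees1 : List String) (speakees2 : List String) (name2id : List (String × List (String × String))) (annotator_names : List String) : Bool :=
  let ids1 : PySem.Set String := PySem.Set.ofList speakees1
  let ids2 : PySem.Set String := PySem.Set.ofList speakees2
  if ids1.isEmpty && ids2.isEmpty then true
  else
    match annotator_names with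
    | a0 :: a1 :: _ =>
      -- m1 = {n: i for n, i in name2id[annotator_names[0]].items() if i in ids1}  (dict as assoc list)
      let m1 := ((PySem.Dict.mk name2id).getD a0 []).filter (fun p => PySem.Set.contains ids1 p.2)
      let m2 := ((PySem.Dict.mk name2id).getD a1 []).filter (fun p => PySem.Set.contains ids2 p.2)
      if ids1.length != ids2.length then false
      else
        -- removed1 = {i for n, i in m1.items() if n in m2}
        let removed1 : PySem.Set String :=
          PySem.Set.ofList ((m1.filter (fun p => m2.any (fun q => q.1 == p.1))).map (·.2))
        let removed2 : PySem.Set String :=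
          PySem.Set.ofList ((m2.filter (fun p => m1.any (fun q => q.1 == p.1))).map (·.2))
        PySem.Set.equal removed1 ids1 && PySem.Set.equal removed2 ids2
    | _ => false

-- ===== PRECONDITION & SPEC =====
-- Pre_ excludes (a) assoc lists whose inner name→id part has duplicate names — a Python dict
-- cannot have duplicate keys, so those lists represent no Python input — and (b) the inputs on
-- which A raises KeyError: some annotator name missing from name2id while the speaker lists are
-- not both empty.
def Pre_check_group_equivalent (speakees1 : List String) (speakees2 : List String) (name2id : List (String × List (String × String))) (annotator_names : List String) : Prop :=
  (∀ p ∈ name2id, (p.2.map Prod.fst).Nodup) ∧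
  ((speakees1 = [] ∧ speakees2 = []) ∨ ∀ ann ∈ annotator_names, ann ∈ name2id.map Prod.fst)
instance (speakees1 : List String) (speakees2 : List String) (name2id : List (String × List (String × String))) (annotator_names : List String) : Decidable (Pre_check_group_equivalent speakees1 speakees2 name2id annotator_names) := by unfold Pre_check_group_equivalent; infer_instance

def pvWitness_check_group_equivalent : List String × List String × (List (String × List (String × String))) × List String :=
  (["i1"], ["i1"], [("x", [("n", "i1")]), ("y", [("n", "i1")])], ["x", "y"])

def Spec_check_group_equivalent (speakees1 : List String) (speakees2 : List String) (name2id : List (String × List (String × String))) (annotator_names : List String) (out : Bool) : Prop := out = check_group_equivalent_alt speakees1 speakees2 name2id annotator_names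
instance (speakees1 : List String) (speakees2 : List String) (name2id : List (String × List (String × String))) (annotator_names : List String) (out : Bool) : Decidable (Spec_check_group_equivalent speakees1 speakees2 name2id annotator_names out) := by unfold Spec_check_group_equivalent; infer_instance

-- ===== CLAIM (what is proved, stated in full; the proofs are below) =====
def Claim_equal_check_group_equivalent : Prop := ∀ (speakees1 : List String) (speakees2 : List String) (name2id : List (String × List (String × String))) (annotator_names : List String), Dom_check_group_equivalent speakees1 speakees2 name2id annotator_names → Pre_check_group_equivalent speakees1 speakees2 name2id annotator_names → Spec_check_group_equivalent speakees1 speakees2 name2id annotator_names (check_group_equivalent speakees1 speakees2 name2id annotator_names)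


-- ===== LEMMAS AND PROOFS =====

-- With unique keys, find? on the key of a member returns that member.
theorem pv_find?_key_of_mem {α : Type} [DecidableEq α] {β : Type} {p : α × β} {d0 : List (α × β)}
    (hnd : (d0.map Prod.fst).Nodup) (hp : p ∈ d0) :
    d0.find? (fun r => r.1 == p.1) = some p := by
  induction d0 with
  | nil => cases hp
  | cons q d ih =>
    simp only [List.map_cons, List.nodup_cons] at hnd
    rcases List.mem_cons.mp hp with h | h
    · subst h; simp [List.find?]
    · have hne : q.1 ≠ p.1 := fun he => hnd.1 (he ▸ List.mem_map_of_mem h)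
      rw [List.find?_cons_of_neg, ih hnd.2 h]
      simp [hne]

theorem pv_inner_getD (L : List (String × String)) (s : String) :
    (L.foldl (fun (g : PySem.Dict String (List String)) p => g.modify p.2 [] (· ++ [p.1]))
        PySem.Dict.empty).getD s []
      = (L.filter (fun p => p.2 == s)).map Prod.fst := by
  have h0 : (L.foldl (fun (g : PySem.Dict String (List String)) p => g.modify p.2 [] (· ++ [p.1]))
      PySem.Dict.empty)
      = ((L.map (fun p => (p.2, p.1))).foldl
          (fun (g : PySem.Dict String (List String)) q => g.modify q.1 [] (· ++ [q.2]))
          PySem.Dict.empty) := by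
    rw [List.foldl_map]
  rw [h0, PySem.Dict.getD_foldl_modify_append, PySem.Dict.getD_empty]
  simp [List.filter_map, Function.comp_def]

theorem pv_getD_foldl_insert_fun {ν : Type} (l : List String) (F : String → ν)
    (d : PySem.Dict String ν) (a : String) (dflt : ν) :
    (l.foldl (fun d k => d.insert k (F k)) d).getD a dflt
      = if a ∈ l then F a else d.getD a dflt := by
  induction l generalizing d with
  | nil => simp
  | cons k l ih =>
    simp only [List.foldl_cons, ih, PySem.Dict.getD_insert, List.mem_cons]
    by_cases h1 : a ∈ l <;> by_cases h2 : a = k <;> simp [h1, h2]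

theorem pv_get?_foldl_insert_const (ns : List String) (s : String)
    (t : PySem.Dict String String) (n : String) :
    (ns.foldl (fun t n' => t.insert n' s) t).get? n
      = if n ∈ ns then some s else t.get? n := by
  induction ns generalizing t with
  | nil => simp
  | cons m ns ih =>
    simp only [List.foldl_cons, ih, PySem.Dict.get?_insert, List.mem_cons]
    by_cases h1 : n ∈ ns <;> by_cases h2 : n = m <;> simp [h1, h2]

theorem pv_mem_discard_foldl (C : List String) (g : String → String)
    (s : PySem.Set String) (x : String) :
    x ∈ C.foldl (fun s c => PySem.Set.discard s (g c)) s ↔ x ∈ s ∧ ∀ c ∈ C, g c ≠ x := by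
  induction C generalizing s with
  | nil => simp
  | cons c C ih =>
    simp only [List.foldl_cons, ih, PySem.Set.mem_discard, List.mem_cons]
    constructor
    · rintro ⟨⟨hs, hne⟩, hall⟩
      refine ⟨hs, fun c' hc' => ?_⟩
      rcases hc' with h | h
      · exact h ▸ fun he => hne he.symm
      · exact hall c' h
    · rintro ⟨hs, hall⟩
      exact ⟨⟨hs, fun he => hall c (Or.inl rfl) he.symm⟩, fun c' hc' => hall c' (Or.inr hc')⟩

theorem pv_discard_foldl_empty_iff (C : List String) (g : String → String)
    (s : PySem.Set String) :
    (C.foldl (fun s c => PySem.Set.discard s (g c)) s = []) ↔ ∀ x ∈ s, ∃ c ∈ C, g c = x := by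
  rw [List.eq_nil_iff_forall_not_mem]
  constructor
  · intro h x hx
    by_contra hno
    push Not at hno
    exact h x ((pv_mem_discard_foldl C g s x).mpr ⟨hx, fun c hc => hno c hc⟩)
  · intro h x hx
    rw [pv_mem_discard_foldl] at hx
    rcases h x hx.1 with ⟨c, hc, he⟩
    exact hx.2 c hc he

theorem pv_mem_names_iff {d0 : List (String × String)} (hnd : (d0.map Prod.fst).Nodup)
    (n s : String) :
    n ∈ (d0.filter (fun p => p.2 == s)).map Prod.fst
      ↔ d0.find? (fun r => r.1 == n) = some (n, s) := by
  constructor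
  · intro h
    rcases List.mem_map.mp h with ⟨p, hp, hp1⟩
    have hp2 : p.2 = s := by simpa using (List.mem_filter.mp hp).2
    have hpm : p ∈ d0 := (List.mem_filter.mp hp).1
    have : p = (n, s) := Prod.ext hp1 hp2
    subst this
    exact pv_find?_key_of_mem hnd hpm
  · intro h
    have hm : (n, s) ∈ d0 := List.mem_of_find?_eq_some h
    exact List.mem_map.mpr ⟨(n, s), List.mem_filter.mpr ⟨hm, by simp⟩, rfl⟩

theorem pv_s2id_get? {d0 : List (String × String)} (hnd : (d0.map Prod.fst).Nodup)
    (S : List String) (t : PySem.Dict String String) (n : String) :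
    (S.foldl (fun t s =>
        ((d0.filter (fun p => p.2 == s)).map Prod.fst).foldl (fun t n' => t.insert n' s) t)
      t).get? n
    = match d0.find? (fun r => r.1 == n) with
      | some p => if p.2 ∈ S then some p.2 else t.get? n
      | none => t.get? n := by
  induction S generalizing t with
  | nil =>
    cases h : d0.find? (fun r => r.1 == n) <;> simp
  | cons s S ih =>
    rw [List.foldl_cons, ih]
    cases h : d0.find? (fun r => r.1 == n) with
    | none =>
      have hnm : n ∉ (d0.filter (fun p => p.2 == s)).map Prod.fst := by
        intro hmem
        rw [pv_mem_names_iff hnd n s] at hmem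
        rw [hmem] at h; cases h
      rw [pv_get?_foldl_insert_const, if_neg hnm]
    | some p =>
      have hp1 : p.1 = n := by simpa using List.find?_some h
      have hmem_iff : n ∈ (d0.filter (fun p => p.2 == s)).map Prod.fst ↔ p.2 = s := by
        rw [pv_mem_names_iff hnd n s, h]
        constructor
        · intro he; cases he; rfl
        · intro he
          have : p = (n, s) := Prod.ext hp1 he
          rw [this]
      rw [pv_get?_foldl_insert_const]
      by_cases hS : p.2 ∈ S
      · simp [hS]
      · by_cases hps : p.2 = s
        · simp [hmem_iff.mpr hps, hps, List.mem_cons]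
        · have : ¬ n ∈ (d0.filter (fun p => p.2 == s)).map Prod.fst := fun hm => hps (hmem_iff.mp hm)
          simp [this, hS, List.mem_cons, hps]

theorem pv_getD_mk_cases (L : List (String × List (String × String))) (a : String) :
    (PySem.Dict.mk L).getD a [] = [] ∨ ∃ p ∈ L, (PySem.Dict.mk L).getD a [] = p.2 := by
  induction L with
  | nil => left; rfl
  | cons q L ih =>
    rw [PySem.Dict.getD_eq_get?_getD, PySem.Dict.get?_mk_cons]
    by_cases h : q.1 == a
    · right; exact ⟨q, List.mem_cons_self, by simp [h]⟩
    · have h' : (q.1 == a) = false := by simpa using h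
      simp only [h', Bool.false_eq_true, if_false]
      rw [← PySem.Dict.getD_eq_get?_getD]
      rcases ih with h' | ⟨p, hp, h'⟩
      · left; simpa [h] using h'
      · right; exact ⟨p, List.mem_cons_of_mem _ hp, by simpa [h] using h'⟩

theorem pv_get?_char {d0 : List (String × String)} (hnd : (d0.map Prod.fst).Nodup)
    (S : List String) (n : String) :
    (S.foldl (fun t s =>
        ((d0.filter (fun p => p.2 == s)).map Prod.fst).foldl (fun t n' => t.insert n' s) t)
      PySem.Dict.empty).get? n
    = (d0.find? (fun r => r.1 == n)).bind (fun p => if p.2 ∈ S then some p.2 else none) := by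
  rw [pv_s2id_get? hnd]
  cases h : d0.find? (fun r => r.1 == n) <;> simp [PySem.Dict.get?_empty]


theorem pv_mem_keys_iff (d : PySem.Dict String String) (k : String) :
    k ∈ PySem.Dict.keys d ↔ (d.get? k).isSome = true := by
  rw [← PySem.Dict.contains_iff_mem_keys, PySem.Dict.contains_eq_isSome_get?]

theorem pv_side (d0 d1 : List (String × String)) (S1 S2 : List String)
    (hnd0 : (d0.map Prod.fst).Nodup) (hnd1 : (d1.map Prod.fst).Nodup) (x : String) :
    (∃ c, ((S1.foldl (fun t s =>
        ((d0.filter (fun p => p.2 == s)).map Prod.fst).foldl (fun t n' => t.insert n' s) t)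
        PySem.Dict.empty).get? c).isSome = true ∧
      ((S2.foldl (fun t s =>
        ((d1.filter (fun p => p.2 == s)).map Prod.fst).foldl (fun t n' => t.insert n' s) t)
        PySem.Dict.empty).get? c).isSome = true ∧
      (S1.foldl (fun t s =>
        ((d0.filter (fun p => p.2 == s)).map Prod.fst).foldl (fun t n' => t.insert n' s) t)
        PySem.Dict.empty).getD c "" = x)
    ↔ x ∈ ((d0.filter (fun p => PySem.Set.contains S1 p.2)).filter
        (fun p => (d1.filter (fun q => PySem.Set.contains S2 q.2)).any (fun q => q.1 == p.1))).map (fun r => r.2) := by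
  simp only [List.mem_map, List.mem_filter, List.any_eq_true,
    pv_get?_char hnd0 S1, pv_get?_char hnd1 S2, PySem.Dict.getD_eq_get?_getD]
  constructor
  · rintro ⟨c, h0, h1, hx⟩
    cases hf0 : d0.find? (fun r => r.1 == c) with
    | none => rw [hf0] at h0; simp at h0
    | some p =>
      rw [hf0] at h0 hx
      cases hf1 : d1.find? (fun r => r.1 == c) with
      | none => rw [hf1] at h1; simp at h1
      | some q =>
        rw [hf1] at h1
        by_cases hpS : p.2 ∈ S1
        · by_cases hqS : q.2 ∈ S2
          · have hx2 : p.2 = x := by simpa [hpS] using hx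
            have hp1 : p.1 = c := by simpa using List.find?_some hf0
            have hq1 : q.1 = c := by simpa using List.find?_some hf1
            refine ⟨p, ⟨⟨List.mem_of_find?_eq_some hf0, (PySem.Set.contains_iff _ _).mpr hpS⟩,
              ⟨q, ⟨List.mem_of_find?_eq_some hf1, (PySem.Set.contains_iff _ _).mpr hqS⟩, ?_⟩⟩, hx2⟩
            simp [hp1, hq1]
          · simp [hqS] at h1
        · simp [hpS] at h0
  · rintro ⟨p, ⟨⟨hpd, hpS⟩, ⟨q, ⟨hqd, hqS⟩, hq1⟩⟩, hx⟩
    have hpS' : p.2 ∈ S1 := (PySem.Set.contains_iff _ _).mp hpS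
    have hqS' : q.2 ∈ S2 := (PySem.Set.contains_iff _ _).mp hqS
    have hq1' : q.1 = p.1 := by simpa using hq1
    refine ⟨p.1, ?_, ?_, ?_⟩
    · rw [pv_find?_key_of_mem hnd0 hpd]; simp [hpS']
    · rw [← hq1', pv_find?_key_of_mem hnd1 hqd]; simp [hqS']
    · rw [pv_find?_key_of_mem hnd0 hpd]; subst hx; simp [hpS']

theorem pv_removed_subset (d0 d1 : List (String × String)) (S1 S2 : List String) (x : String)
    (hx : x ∈ ((d0.filter (fun p => PySem.Set.contains S1 p.2)).filter
        (fun p => (d1.filter (fun q => PySem.Set.contains S2 q.2)).any (fun q => q.1 == p.1))).map (fun r => r.2)) :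
    x ∈ S1 := by
  rcases List.mem_map.mp hx with ⟨p, hp, hpx⟩
  have := (List.mem_filter.mp (List.mem_filter.mp hp).1).2
  exact hpx ▸ (PySem.Set.contains_iff _ _).mp this

theorem pv_core (d0 d1 : List (String × String)) (S1 S2 : List String)
    (hnd0 : (d0.map Prod.fst).Nodup) (hnd1 : (d1.map Prod.fst).Nodup) :
    (let s2id1 := S1.foldl (fun t s =>
        ((d0.filter (fun p => p.2 == s)).map Prod.fst).foldl (fun t n' => t.insert n' s) t)
        PySem.Dict.empty
     let s2id2 := S2.foldl (fun t s =>
        ((d1.filter (fun p => p.2 == s)).map Prod.fst).foldl (fun t n' => t.insert n' s) t)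
        PySem.Dict.empty
     let common : PySem.Set String :=
       PySem.Set.inter (PySem.Set.ofList (PySem.Dict.keys s2id1)) (PySem.Set.ofList (PySem.Dict.keys s2id2))
     let final := common.foldl
       (fun (st : PySem.Set String × PySem.Set String) com =>
         (PySem.Set.discard st.1 (s2id1.getD com ""), PySem.Set.discard st.2 (s2id2.getD com "")))
       (S1, S2)
     if final.1.length == 0 && final.2.length == 0 then true else false)
    = (let m1 := d0.filter (fun p => PySem.Set.contains S1 p.2)
       let m2 := d1.filter (fun p => PySem.Set.contains S2 p.2)
       PySem.Set.equal (PySem.Set.ofList ((m1.filter (fun p => m2.any (fun q => q.1 == p.1))).map (·.2))) S1 &&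
       PySem.Set.equal (PySem.Set.ofList ((m2.filter (fun p => m1.any (fun q => q.1 == p.1))).map (·.2))) S2) := by
  simp only []
  rw [PySem.List.foldl_prod_mk
    (f := fun st com => PySem.Set.discard st
      ((S1.foldl (fun t s =>
        ((d0.filter (fun p => p.2 == s)).map Prod.fst).foldl (fun t n' => t.insert n' s) t)
        PySem.Dict.empty).getD com ""))
    (g := fun st com => PySem.Set.discard st
      ((S2.foldl (fun t s =>
        ((d1.filter (fun p => p.2 == s)).map Prod.fst).foldl (fun t n' => t.insert n' s) t)
        PySem.Dict.empty).getD com ""))]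
  rw [Bool.eq_iff_iff]
  simp only [Bool.if_false_right, Bool.and_true, Bool.and_eq_true, beq_iff_eq, List.length_eq_zero_iff,
    pv_discard_foldl_empty_iff, PySem.Set.equal_iff]
  rw [decide_eq_true_eq]
  simp only [PySem.Set.mem_inter, PySem.Set.mem_ofList, pv_mem_keys_iff]
  refine and_congr ?_ ?_
  · constructor
    · intro h x
      refine ⟨fun hm => pv_removed_subset d0 d1 S1 S2 x hm, fun hx => ?_⟩
      rcases h x hx with ⟨c, ⟨h0, h1⟩, hg⟩
      exact (pv_side d0 d1 S1 S2 hnd0 hnd1 x).mp ⟨c, h0, h1, hg⟩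
    · intro h x hx
      rcases (pv_side d0 d1 S1 S2 hnd0 hnd1 x).mpr ((h x).mpr hx) with ⟨c, h0, h1, hg⟩
      exact ⟨c, ⟨h0, h1⟩, hg⟩
  · constructor
    · intro h x
      refine ⟨fun hm => pv_removed_subset d1 d0 S2 S1 x hm, fun hx => ?_⟩
      rcases h x hx with ⟨c, ⟨h0, h1⟩, hg⟩
      exact (pv_side d1 d0 S2 S1 hnd1 hnd0 x).mp ⟨c, h1, h0, hg⟩
    · intro h x hx
      rcases (pv_side d1 d0 S2 S1 hnd1 hnd0 x).mpr ((h x).mpr hx) with ⟨c, h1, h0, hg⟩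
      exact ⟨c, ⟨h0, h1⟩, hg⟩

theorem pv_ofList_ne_nil {s : List String} (h : s ≠ []) : PySem.Set.ofList s ≠ [] := by
  cases s with
  | nil => exact absurd rfl h
  | cons a t =>
    intro he
    have : a ∈ PySem.Set.ofList (a :: t) := (PySem.Set.mem_ofList _ _).mpr List.mem_cons_self
    rw [he] at this
    cases this

-- ===== VERDICT (by name: the statement is the Claim_ definition above) =====
theorem check_group_equivalent_spec : Claim_equal_check_group_equivalent := by
  intro s1 s2 nm anns _dom hpre
  unfold Spec_check_group_equivalent check_group_equivalent check_group_equivalent_alt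
  rcases hpre with ⟨hinner, -⟩
  by_cases hemp : (s1.length == 0 && s2.length == 0) = true
  · have h1 : s1 = [] := by
      simp only [Bool.and_eq_true, beq_iff_eq] at hemp
      exact List.length_eq_zero_iff.mp hemp.1
    have h2 : s2 = [] := by
      simp only [Bool.and_eq_true, beq_iff_eq] at hemp
      exact List.length_eq_zero_iff.mp hemp.2
    subst h1; subst h2
    simp
  · have hne : ¬(s1 = [] ∧ s2 = []) := by
      rintro ⟨h1, h2⟩; subst h1; subst h2; exact hemp (by decide)
    rw [if_neg hemp]
    simp only []
    have hee : (((PySem.Set.ofList s1).isEmpty && (PySem.Set.ofList s2).isEmpty) = false) := by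
      cases h1 : (PySem.Set.ofList s1).isEmpty
      · simp
      · cases h2 : (PySem.Set.ofList s2).isEmpty
        · simp
        · exfalso
          rw [List.isEmpty_iff] at h1 h2
          apply hne
          constructor
          · by_contra hs1'
            exact pv_ofList_ne_nil hs1' h1
          · by_contra hs2'
            exact pv_ofList_ne_nil hs2' h2
    rw [hee]
    simp only [Bool.false_eq_true, if_false]
    by_cases hlen : ((PySem.Set.ofList s1).length != (PySem.Set.ofList s2).length) = true
    · rw [if_pos hlen]
      match anns with
      | [] => rfl
      | [a0] => rfl
      | a0 :: a1 :: rest =>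
        simp only [hlen, if_true]
    · simp only [Bool.not_eq_true] at hlen
      have hlen' : (PySem.Set.ofList s1).length = (PySem.Set.ofList s2).length := by
        simpa using hlen
      have hs1 : s1 ≠ [] := by
        intro h
        apply hne
        refine ⟨h, ?_⟩
        subst h
        have h2 : (PySem.Set.ofList s2).length = 0 := by simpa using hlen'.symm
        by_contra hs2
        exact pv_ofList_ne_nil hs2 (List.length_eq_zero_iff.mp h2)
      have hS1len : ((PySem.Set.ofList s1).length == 0) = false := by
        rw [beq_eq_false_iff_ne]
        intro h
        exact pv_ofList_ne_nil hs1 (List.length_eq_zero_iff.mp h)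
      rw [hlen]
      simp only [Bool.false_eq_true, if_false]
      match anns with
      | [] =>
        simp only [List.zip_nil_left, List.map_nil, List.getD_nil]
        have hcom : PySem.Set.inter (PySem.Set.ofList (PySem.Dict.keys (PySem.Dict.empty (κ := String) (ν := String)))) (PySem.Set.ofList (PySem.Dict.keys (PySem.Dict.empty (κ := String) (ν := String)))) = [] := by
          apply List.eq_nil_iff_forall_not_mem.mpr
          intro x hx
          have := (PySem.Set.mem_inter _ _ _).mp hx
          simp [PySem.Dict.keys_empty] at this
        simp only [hcom]
        simp [hS1len]
      | [a0] =>
        simp only [List.zip_cons_cons, List.zip_nil_left, List.map_cons,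
          List.map_nil, List.getD, List.getElem?_cons_zero, List.getElem?_cons_succ,
          List.getElem?_nil, Option.getD_some, Option.getD_none]
        have hcom : ∀ (d : PySem.Dict String String), PySem.Set.inter (PySem.Set.ofList (PySem.Dict.keys d)) (PySem.Set.ofList (PySem.Dict.keys (PySem.Dict.empty (κ := String) (ν := String)))) = [] := by
          intro d
          apply List.eq_nil_iff_forall_not_mem.mpr
          intro x hx
          have := (PySem.Set.mem_inter _ _ _).mp hx
          simp [PySem.Dict.keys_empty] at this
        simp only [hcom]
        simp [hS1len]
      | a0 :: a1 :: rest =>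
        simp only [List.zip_cons_cons, List.zip_nil_right, List.map_cons,
          List.map_nil, List.getD, List.getElem?_cons_zero, Option.getD_some]
        simp only [pv_getD_foldl_insert_fun, List.mem_cons, true_or, or_true, if_true]
        simp only [pv_inner_getD]
        have hnd0 : (((PySem.Dict.mk nm).getD a0 []).map Prod.fst).Nodup := by
          rcases pv_getD_mk_cases nm a0 with h | ⟨p, hp, h⟩
          · rw [h]; simp
          · rw [h]; exact hinner p hp
        have hnd1 : (((PySem.Dict.mk nm).getD a1 []).map Prod.fst).Nodup := by
          rcases pv_getD_mk_cases nm a1 with h | ⟨p, hp, h⟩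
          · rw [h]; simp
          · rw [h]; exact hinner p hp
        have hcore := pv_core ((PySem.Dict.mk nm).getD a0 []) ((PySem.Dict.mk nm).getD a1 [])
          (PySem.Set.ofList s1) (PySem.Set.ofList s2) hnd0 hnd1
        simp only [] at hcore
        exact hcore
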